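-- pv_equiv track=rewrite | github.com/seoiiwon/Algorithm | 백준/Bronze/2775. 부녀회장이 될테야/부녀회장이 될테야.py | whatsInMyRoom
-- ===== SOURCE A (Python) =====
-- def whatsInMyRoom(floor, room):
--     aptList = [[r for r in range(1, room + 1)]]
--     for f in range(1, floor + 1):
--         floorList = []
--         for r in range(room):
--             floorList.append(sum(aptList[-1][:r+1]))
--         aptList.append(floorList)
--
--     return aptList
-- ===== SOURCE B (Python) =====
-- def whatsInMyRoom(floor, room):
--     row = list(range(1, room + 1))
--     aptList = [row]
--     for _ in range(max(floor, 0)):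
--         new = []
--         s = 0
--         for v in row:
--             s += v
--             new.append(s)
--         aptList.append(new)
--         row = new
--     return aptList
-- ===== Notes on version B (the rewrite author's own statement) =====
-- stated objective: faster
-- what changed: Each new floor is built by one running prefix-sum pass over the previous row instead of re-summing the slice prev[:r+1] for every room.
import Mathlib
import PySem

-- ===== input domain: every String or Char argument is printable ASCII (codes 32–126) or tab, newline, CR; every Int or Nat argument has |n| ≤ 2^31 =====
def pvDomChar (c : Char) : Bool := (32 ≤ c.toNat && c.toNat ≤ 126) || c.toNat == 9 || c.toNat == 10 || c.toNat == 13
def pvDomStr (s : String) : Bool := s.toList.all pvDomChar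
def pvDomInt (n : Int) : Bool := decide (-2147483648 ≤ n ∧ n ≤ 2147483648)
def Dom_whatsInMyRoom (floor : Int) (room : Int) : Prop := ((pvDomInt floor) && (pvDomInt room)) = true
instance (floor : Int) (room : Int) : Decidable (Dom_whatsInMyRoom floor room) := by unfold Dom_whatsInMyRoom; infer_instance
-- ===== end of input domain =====

-- B replaces A's quadratic per-floor re-summing of slices by one running prefix-sum pass per floor (objective: faster).

-- ===== PORT A =====
-- literal transliteration of A: for each new floor, for each r, sum the slice aptList[-1][:r+1]
def whatsInMyRoom (floor : Int) (room : Int) : List (List Int) :=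
  (PySem.List.pyRange 1 (floor + 1) 1).foldl
    (fun aptList _f =>
      let floorList := (PySem.List.pyRange 0 room 1).foldl
        (fun fl r =>
          fl ++ [(PySem.List.slice (PySem.List.pyGetD aptList (-1) []) none (some (r + 1))).sum]) []
      aptList ++ [floorList])
    [PySem.List.pyRange 1 (room + 1) 1]

-- ===== PORT B =====
-- running prefix sums of one row (Source B's inner loop: s accumulates, new collects)
def pvPrefix (row : List Int) : List Int :=
  (row.foldl (fun (p : Int × List Int) v => (p.1 + v, p.2 ++ [p.1 + v])) (0, [])).2

-- Source B's outer loop: repeat `floor`-many times, appending the prefix-summed row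
def pvAltLoop : Nat → List Int → List (List Int) → List (List Int)
  | 0, _, acc => acc
  | n + 1, row, acc =>
      let new := pvPrefix row
      pvAltLoop n new (acc ++ [new])

def whatsInMyRoom_alt (floor : Int) (room : Int) : List (List Int) :=
  let row := PySem.List.pyRange 1 (room + 1) 1
  pvAltLoop (max floor 0).toNat row [row]

-- ===== PRECONDITION & SPEC =====
def Spec_whatsInMyRoom (floor : Int) (room : Int) (out : List (List Int)) : Prop := out = whatsInMyRoom_alt floor room
instance (floor : Int) (room : Int) (out : List (List Int)) : Decidable (Spec_whatsInMyRoom floor room out) := by unfold Spec_whatsInMyRoom; infer_instance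

-- ===== CLAIM (what is proved, stated in full; the proofs are below) =====
def Claim_equal_whatsInMyRoom : Prop := ∀ (floor : Int) (room : Int), Dom_whatsInMyRoom floor room → Spec_whatsInMyRoom floor room (whatsInMyRoom floor room)

-- ===== LEMMAS AND PROOFS =====

-- invariant of B's inner fold: it produces acc ++ the shifted prefix sums
lemma pvPrefix_fold_invar (xs : List Int) : ∀ (s : Int) (acc : List Int),
    (xs.foldl (fun (p : Int × List Int) v => (p.1 + v, p.2 ++ [p.1 + v])) (s, acc)).2
      = acc ++ (List.range xs.length).map (fun k => s + (xs.take (k + 1)).sum) := by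
  induction xs with
  | nil => simp
  | cons x xs ih =>
      intro s acc
      simp only [List.foldl_cons, List.length_cons, List.range_succ_eq_map, List.map_cons,
        List.map_map, ih]
      simp [Function.comp, add_assoc]

lemma pvPrefix_eq_map (xs : List Int) :
    pvPrefix xs = (List.range xs.length).map (fun k => (xs.take (k + 1)).sum) := by
  simpa using pvPrefix_fold_invar xs 0 []

lemma pvPrefix_length (xs : List Int) : (pvPrefix xs).length = xs.length := by
  simp [pvPrefix_eq_map]

-- A's inner loop over range(room) equals B's prefix-sum pass, given the row has room-many entries
lemma row_eq (room : Int) (prev : List Int) (h : prev.length = room.toNat) :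
    (PySem.List.pyRange 0 room 1).foldl
      (fun fl r => fl ++ [(PySem.List.slice prev none (some (r + 1))).sum]) []
      = pvPrefix prev := by
  rw [PySem.List.foldl_append_singleton_eq_map, pvPrefix_eq_map, h]
  by_cases hr : room ≤ 0
  · have : room.toNat = 0 := Int.toNat_of_nonpos hr
    rw [PySem.List.pyRange_one_eq_nil (by omega), this]
    simp
  · push Not at hr
    rw [PySem.List.pyRange_one, List.map_map]
    simp only [Int.sub_zero]
    apply List.map_congr_left
    intro k _
    simp only [Function.comp]
    have : (0 : Int) + (k : Int) + 1 = ((k + 1 : Nat) : Int) := by push_cast; ring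
    rw [this, PySem.List.slice_to_natCast]

-- A's outer fold equals B's counted recursion, with invariant: acc ends in row and row has room-many entries
lemma outer_eq (room : Int) : ∀ (l : List Int) (acc : List (List Int)) (row : List Int),
    acc.getLast? = some row → row.length = room.toNat →
    l.foldl
      (fun aptList _f =>
        let floorList := (PySem.List.pyRange 0 room 1).foldl
          (fun fl r =>
            fl ++ [(PySem.List.slice (PySem.List.pyGetD aptList (-1) []) none (some (r + 1))).sum]) []
        aptList ++ [floorList]) acc
      = pvAltLoop l.length row acc := by
  intro l
  induction l with
  | nil => intro acc row _ _; simp [pvAltLoop]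
  | cons x l ih =>
      intro acc row hlast hlen
      have hne : acc ≠ [] := by
        intro h; rw [h] at hlast; simp at hlast
      have hget : PySem.List.pyGetD acc (-1) ([] : List Int) = row := by
        rw [PySem.List.pyGetD_neg_one acc ([] : List Int) hne]
        rw [List.getLast?_eq_some_getLast hne] at hlast
        exact Option.some_injective _ hlast
      simp only [List.foldl_cons, List.length_cons, pvAltLoop]
      rw [hget, row_eq room row hlen]
      exact ih (acc ++ [pvPrefix row]) (pvPrefix row) (by simp)
        (by rw [pvPrefix_length, hlen])

-- ===== VERDICT (by name: the statement is the Claim_ definition above) =====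
theorem whatsInMyRoom_spec : Claim_equal_whatsInMyRoom := by
  intro floor room _
  unfold Spec_whatsInMyRoom whatsInMyRoom whatsInMyRoom_alt
  rw [outer_eq room _ _ (PySem.List.pyRange 1 (room + 1) 1) (by simp)
    (by rw [PySem.List.length_pyRange_one]; omega)]
  congr 1
  rw [PySem.List.length_pyRange_one]
  omega
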